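-- pv_equiv track=rewrite | github.com/memosiki/advent-of-code-2024 | 02/02.py | damp_safe
-- ===== SOURCE A (Python) =====
-- from itertools import pairwise
-- from typing import Sequence
--
-- def safe(nums: Sequence[int]) -> bool:
--     diffs = [a - b for a, b in pairwise(nums)]
--     return all(1 <= abs(diff) <= 3 for diff in diffs) and (
--         all(diff < 0 for diff in diffs) or all(diff > 0 for diff in diffs)
--     )
--
-- def damp_safe(nums: list[int]) -> bool:
--     # fixme: use linked list
--     if safe(nums):
--         return True
--     for i in range(len(nums)):
--         elem = nums.pop(i)
--         if safe(nums):
--             return True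
--         nums.insert(i, elem)
--     return False
-- ===== SOURCE B (Python) =====
-- def _first_bad(nums, s):
--     # index of the first adjacent pair (a, b) with s*(b-a) outside [1, 3], else None
--     for i, (a, b) in enumerate(zip(nums, nums[1:])):
--         if not (1 <= s * (b - a) <= 3):
--             return i
--     return None
--
--
-- def _mono(nums, s):
--     return all(1 <= s * (b - a) <= 3 for a, b in zip(nums, nums[1:]))
--
--
-- def _damp_dir(nums, s):
--     k = _first_bad(nums, s)
--     if k is None:
--         return True
--     # only removing an endpoint of the first bad pair can help
--     return (_mono(nums[:k] + nums[k + 1:], s)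
--             or _mono(nums[:k + 1] + nums[k + 2:], s))
--
--
-- def damp_safe(nums: list[int]) -> bool:
--     return _damp_dir(nums, 1) or _damp_dir(nums, -1)
-- ===== Notes on version B (the rewrite author's own statement) =====
-- stated objective: faster
-- what changed: Instead of re-testing the whole list after removing every index, B locates the first adjacent pair violating the step rule for each direction and tests only the removal of that pair's two endpoints.
import Mathlib
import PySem

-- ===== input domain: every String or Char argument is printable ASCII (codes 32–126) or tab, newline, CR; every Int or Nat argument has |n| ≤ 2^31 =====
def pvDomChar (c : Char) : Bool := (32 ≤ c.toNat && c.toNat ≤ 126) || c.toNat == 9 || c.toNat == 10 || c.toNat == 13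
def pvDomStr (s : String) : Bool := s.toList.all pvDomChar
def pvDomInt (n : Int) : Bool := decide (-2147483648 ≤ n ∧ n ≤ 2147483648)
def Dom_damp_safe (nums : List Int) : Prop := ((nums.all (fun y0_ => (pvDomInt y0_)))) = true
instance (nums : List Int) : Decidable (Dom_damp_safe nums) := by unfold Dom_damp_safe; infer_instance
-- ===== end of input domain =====

-- B replaces A's try-every-removal O(n^2) scan by locating the first bad adjacent pair per
-- direction and testing only the removal of its two endpoints (O(n)); equivalence is about the
-- return value only: Python A mutates `nums` in place (pop without re-insert on early True), B does not.

-- ===== PORT A =====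
def pySafe (nums : List Int) : Bool :=
  let diffs := (nums.zip nums.tail).map (fun p => p.1 - p.2)
  (diffs.all fun d => decide (1 ≤ |d| ∧ |d| ≤ 3)) &&
    ((diffs.all fun d => decide (d < 0)) || (diffs.all fun d => decide (0 < d)))

def dampLoopA (idxs : List Int) (nums : List Int) : Bool :=
  match idxs with
  | [] => false
  | i :: rest =>
    match PySem.List.pop? nums i with
    | some (elem, popped) =>
      if pySafe popped then true
      else dampLoopA rest (PySem.List.insert popped i elem)
    | none => false

def damp_safe (nums : List Int) : Bool :=
  if pySafe nums then true
  else dampLoopA (PySem.List.pyRange 0 nums.length 1) nums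

-- ===== PORT B =====
def goodStep (s a b : Int) : Bool := decide (1 ≤ s * (b - a)) && decide (s * (b - a) ≤ 3)

def firstBadGo (s : Int) (ps : List (Int × Int × Int)) : Option Int :=
  match ps with
  | [] => none
  | (i, a, b) :: rest => if !(goodStep s a b) then some i else firstBadGo s rest

def firstBad (nums : List Int) (s : Int) : Option Int :=
  firstBadGo s (PySem.List.enumerate (nums.zip (PySem.List.slice nums (some 1) none)) 0)

def monoStep (nums : List Int) (s : Int) : Bool :=
  (nums.zip (PySem.List.slice nums (some 1) none)).all (fun p => goodStep s p.1 p.2)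

def dampDir (nums : List Int) (s : Int) : Bool :=
  match firstBad nums s with
  | none => true
  | some k =>
      monoStep (PySem.List.slice nums none (some k) ++ PySem.List.slice nums (some (k+1)) none) s
      || monoStep (PySem.List.slice nums none (some (k+1)) ++ PySem.List.slice nums (some (k+2)) none) s

def damp_safe_alt (nums : List Int) : Bool := dampDir nums 1 || dampDir nums (-1)

-- ===== PRECONDITION & SPEC =====
def Spec_damp_safe (nums : List Int) (out : Bool) : Prop := out = damp_safe_alt nums
instance (nums : List Int) (out : Bool) : Decidable (Spec_damp_safe nums out) := by unfold Spec_damp_safe; infer_instance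

-- ===== CLAIM (what is proved, stated in full; the proofs are below) =====
def Claim_equal_damp_safe : Prop := ∀ (nums : List Int), Dom_damp_safe nums → Spec_damp_safe nums (damp_safe nums)

-- ===== LEMMAS AND PROOFS =====

-- canonical form of B's step check over adjacent pairs
def monoC (s : Int) (l : List Int) : Bool := (l.zip l.tail).all (fun p => goodStep s p.1 p.2)

lemma monoStep_eq (l : List Int) (s : Int) : monoStep l s = monoC s l := by
  rw [monoStep, monoC, PySem.List.slice_from_one]

lemma monoC_iff (s : Int) (l : List Int) :
    monoC s l = true ↔ ∀ i : Nat, (h : i + 1 < l.length) → goodStep s l[i] l[i+1] = true := by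
  rw [monoC, List.all_eq_true, List.forall_mem_iff_getElem]
  constructor
  · intro h i hi
    have hz : i < (l.zip l.tail).length := by simp [List.length_zip, List.length_tail]; omega
    have := h i hz
    simpa [List.getElem_zip, List.getElem_tail] using this
  · intro h i hi
    have hl : i + 1 < l.length := by
      simp [List.length_zip, List.length_tail] at hi; omega
    have := h i hl
    simpa [List.getElem_zip, List.getElem_tail] using this

lemma pySafe_eq (l : List Int) : pySafe l = (monoC 1 l || monoC (-1) l) := by
  rw [Bool.eq_iff_iff]
  simp only [pySafe, monoC, List.all_map, Function.comp, Bool.and_eq_true, Bool.or_eq_true,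
    List.all_eq_true, goodStep, decide_eq_true_eq, abs_le, le_abs]
  constructor
  · rintro ⟨hp, hq | hq⟩
    · left; intro x hx; have h1 := hp x hx; have h2 := hq x hx; omega
    · right; intro x hx; have h1 := hp x hx; have h2 := hq x hx; omega
  · rintro (hg | hg)
    · exact ⟨fun x hx => by have := hg x hx; omega, Or.inl fun x hx => by have := hg x hx; omega⟩
    · exact ⟨fun x hx => by have := hg x hx; omega, Or.inr fun x hx => by have := hg x hx; omega⟩

lemma insert_natCast_eq (xs : List Int) (n : Nat) (h : n ≤ xs.length) (v : Int) :
    PySem.List.insert xs (n : Int) v = xs.take n ++ v :: xs.drop n := by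
  have hk : (if (n:Int) < 0 then max ((n:Int) + xs.length) 0 else min (n:Int) xs.length).toNat = n := by
    rw [if_neg (by omega)]; omega
  simp [PySem.List.insert, PySem.List.sliceIndices, hk]

lemma insert_eraseIdx_restore (xs : List Int) (j : Nat) (hj : j < xs.length) :
    PySem.List.insert (xs.eraseIdx j) (j : Int) (xs[j]) = xs := by
  rw [insert_natCast_eq _ j (by rw [List.length_eraseIdx]; split <;> omega)]
  have hlt : (xs.take j).length = j := by simp; omega
  have h1 : (xs.eraseIdx j).take j = xs.take j := by
    rw [List.eraseIdx_eq_take_drop_succ, List.take_append, hlt]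
    simp [List.take_take]
  have h2 : (xs.eraseIdx j).drop j = xs.drop (j + 1) := by
    rw [List.eraseIdx_eq_take_drop_succ, List.drop_append, hlt]
    simp [List.drop_of_length_le, hlt]
  rw [h1, h2, List.getElem_cons_drop hj, List.take_append_drop]

lemma dampLoopA_eq (nums : List Int) (js : List Nat) (h : ∀ j ∈ js, j < nums.length) :
    dampLoopA (js.map Int.ofNat) nums = js.any (fun j => pySafe (nums.eraseIdx j)) := by
  induction js with
  | nil => simp [dampLoopA]
  | cons j js ih =>
    have hj : j < nums.length := h j (by simp)
    rw [List.map_cons, List.any_cons]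
    rw [dampLoopA]
    rw [show Int.ofNat j = (j : Int) from rfl, PySem.List.pop?_natCast nums j hj]
    dsimp only
    by_cases hs : pySafe (nums.eraseIdx j) = true
    · simp [hs]
    · simp only [Bool.not_eq_true] at hs
      rw [hs, if_neg (by simp), insert_eraseIdx_restore nums j hj, Bool.false_or]
      exact ih (fun x hx => h x (by simp [hx]))

lemma firstBadGo_enum (s : Int) (L : List (Int × Int)) (c : Int) :
    firstBadGo s (PySem.List.enumerate L c)
      = (List.findIdx? (fun p => !goodStep s p.1 p.2) L).map (fun n : Nat => c + (n : Int)) := by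
  induction L generalizing c with
  | nil => simp [firstBadGo, PySem.List.enumerate_nil]
  | cons x L ih =>
    obtain ⟨a, b⟩ := x
    rw [PySem.List.enumerate_cons, List.findIdx?_cons]
    cases hgood : goodStep s a b with
    | false => simp [firstBadGo, hgood]
    | true =>
      simp only [firstBadGo, hgood, Bool.not_true, Bool.false_eq_true, if_false, ih (c + 1),
        Option.map_map]
      congr 1
      funext n
      simp only [Function.comp_apply]
      push_cast
      ring

lemma firstBad_none_iff (l : List Int) (s : Int) :
    firstBad l s = none ↔ monoC s l = true := by
  rw [firstBad, PySem.List.slice_from_one, firstBadGo_enum, monoC, List.all_eq_true]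
  simp only [Option.map_eq_none_iff, List.findIdx?_eq_none_iff]
  constructor
  · intro h p hp; have := h p hp; simpa using this
  · intro h p hp; have := h p hp; simpa using this

lemma firstBad_some (l : List Int) (s : Int) (k : Int) (hk : firstBad l s = some k) :
    ∃ (n : Nat) (hn : n + 1 < l.length),
      k = (n : Int) ∧ goodStep s (l[n]'(Nat.lt_of_succ_lt hn)) (l[n+1]'hn) = false := by
  rw [firstBad, PySem.List.slice_from_one, firstBadGo_enum] at hk
  rcases Option.map_eq_some_iff.mp hk with ⟨n, hn, rfl⟩
  rcases List.findIdx?_eq_some_iff_getElem.mp hn with ⟨hlt, hbad, -⟩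
  have hl : n + 1 < l.length := by
    simp [List.length_zip, List.length_tail] at hlt; omega
  refine ⟨n, hl, by simp, ?_⟩
  simp only [List.getElem_zip, List.getElem_tail] at hbad
  simpa using hbad

lemma not_mono_erase {s : Int} {l : List Int} {n j : Nat}
    (hn : n + 1 < l.length) (hbad : goodStep s l[n] l[n+1] = false)
    (hj : j < l.length) (h1 : j ≠ n) (h2 : j ≠ n + 1) :
    monoC s (l.eraseIdx j) = false := by
  rw [Bool.eq_false_iff]
  intro hmono
  rw [monoC_iff] at hmono
  have hlen : (l.eraseIdx j).length = l.length - 1 := by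
    rw [List.length_eraseIdx]; split <;> omega
  rcases Nat.lt_or_ge j n with hcase | hcase
  · -- j < n: the bad pair sits at (n-1, n) in the erased list
    have hb : (n - 1) + 1 < (l.eraseIdx j).length := by omega
    have := hmono (n - 1) hb
    rw [List.getElem_eraseIdx, List.getElem_eraseIdx] at this
    rw [dif_neg (by omega), dif_neg (by omega)] at this
    have e1 : n - 1 + 1 = n := by omega
    have e2 : n - 1 + 1 + 1 = n + 1 := by omega
    simp only [e1] at this
    rw [hbad] at this; exact Bool.false_ne_true this
  · -- j > n + 1: the bad pair stays at (n, n+1)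
    have hgt : n + 1 < j := by omega
    have hb : n + 1 < (l.eraseIdx j).length := by omega
    have := hmono n hb
    rw [List.getElem_eraseIdx, List.getElem_eraseIdx] at this
    rw [dif_pos (by omega), dif_pos (by omega)] at this
    rw [hbad] at this; exact Bool.false_ne_true this

lemma slice_erase (l : List Int) (n : Nat) :
    PySem.List.slice l none (some (n : Int)) ++ PySem.List.slice l (some ((n : Int) + 1)) none
      = l.eraseIdx n := by
  have e : (n : Int) + 1 = ((n + 1 : Nat) : Int) := by push_cast; ring
  rw [e, PySem.List.slice_to_natCast, PySem.List.slice_from_natCast,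
    List.eraseIdx_eq_take_drop_succ]

lemma dampDir_eq (l : List Int) (s : Int) :
    dampDir l s = (monoC s l || (List.range l.length).any (fun k => monoC s (l.eraseIdx k))) := by
  rw [dampDir]
  cases hfb : firstBad l s with
  | none =>
    rw [(firstBad_none_iff l s).mp hfb]
    simp
  | some k =>
    obtain ⟨n, hn, rfl, hbad⟩ := firstBad_some l s k hfb
    have hml : monoC s l = false := by
      rw [Bool.eq_false_iff]; intro hm
      rw [monoC_iff] at hm
      have := hm n hn
      rw [hbad] at this; exact Bool.false_ne_true this
    dsimp only
    rw [hml, Bool.false_or]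
    have e1 : (n : Int) + 1 = ((n + 1 : Nat) : Int) := by push_cast; ring
    have e2 : (n : Int) + 2 = ((n + 1 : Nat) : Int) + 1 := by push_cast; ring
    rw [monoStep_eq, monoStep_eq, slice_erase l n]
    rw [e1, e2, slice_erase l (n + 1)]
    rw [Bool.eq_iff_iff, Bool.or_eq_true, List.any_eq_true]
    constructor
    · rintro (h | h)
      · exact ⟨n, by simp [List.mem_range]; omega, h⟩
      · exact ⟨n + 1, by simp [List.mem_range]; omega, h⟩
    · rintro ⟨j, hj, hmono⟩
      rw [List.mem_range] at hj
      by_cases hjn : j = n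
      · subst hjn; exact Or.inl hmono
      by_cases hjn1 : j = n + 1
      · subst hjn1; exact Or.inr hmono
      · exact absurd hmono (by rw [not_mono_erase hn hbad hj hjn hjn1]; simp)

lemma any_or_split (l : List Nat) (f g : Nat → Bool) :
    l.any (fun x => f x || g x) = (l.any f || l.any g) := by
  induction l with
  | nil => simp
  | cons x l ih =>
    simp only [List.any_cons, ih]
    cases f x <;> cases g x <;> simp

lemma damp_safe_eq (nums : List Int) :
    damp_safe nums
      = (pySafe nums || (List.range nums.length).any (fun j => pySafe (nums.eraseIdx j))) := by
  rw [damp_safe]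
  by_cases hs : pySafe nums = true
  · simp [hs]
  · simp only [Bool.not_eq_true] at hs
    rw [if_neg (by simp [hs]), hs, Bool.false_or]
    have hr : PySem.List.pyRange 0 nums.length 1 = (List.range nums.length).map Int.ofNat := by
      rw [PySem.List.pyRange_one]
      simp [Int.ofNat_eq_natCast]
    rw [hr, dampLoopA_eq nums _ (fun j hj => List.mem_range.mp hj)]

-- ===== VERDICT (by name: the statement is the Claim_ definition above) =====
theorem damp_safe_spec : Claim_equal_damp_safe := by
  intro nums _
  unfold Spec_damp_safe
  rw [damp_safe_eq, damp_safe_alt, dampDir_eq, dampDir_eq, pySafe_eq]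
  have : (fun j => pySafe (nums.eraseIdx j)) = fun j => (monoC 1 (nums.eraseIdx j) || monoC (-1) (nums.eraseIdx j)) := by
    funext j; rw [pySafe_eq]
  rw [this, any_or_split]
  simp [Bool.or_assoc, Bool.or_left_comm]
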